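-- pv_equiv track=rewrite | github.com/Manisshhhhhh/Aidssist | backend/services/explainer.py | _map_transformed_feature
-- ===== SOURCE A (Python) =====
-- def _map_transformed_feature(transformed_name: str, original_features: list[str]) -> str:
--     raw_name = str(transformed_name)
--     if "__" in raw_name:
--         raw_name = raw_name.split("__", 1)[1]
--
--     for original in sorted((str(item) for item in original_features), key=len, reverse=True):
--         if raw_name == original or raw_name.startswith(f"{original}_"):
--             return original
--     return raw_name
-- ===== SOURCE B (Python) =====
-- def _map_transformed_feature(transformed_name: str, original_features: list[str]) -> str:
--     raw_name = str(transformed_name)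
--     if "__" in raw_name:
--         raw_name = raw_name.split("__", 1)[1]
--
--     best = None
--     for item in original_features:
--         original = str(item)
--         if raw_name == original or raw_name.startswith(original + "_"):
--             if best is None or len(original) > len(best):
--                 best = original
--     return raw_name if best is None else best
-- ===== Notes on version B (the rewrite author's own statement) =====
-- stated objective: faster
-- what changed: Replaced sort-by-length-descending-then-first-match with a single unsorted pass keeping the longest match seen (strict-greater update preserves the tie-break, which is vacuous since equal-length matches are equal strings).
import Mathlib
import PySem

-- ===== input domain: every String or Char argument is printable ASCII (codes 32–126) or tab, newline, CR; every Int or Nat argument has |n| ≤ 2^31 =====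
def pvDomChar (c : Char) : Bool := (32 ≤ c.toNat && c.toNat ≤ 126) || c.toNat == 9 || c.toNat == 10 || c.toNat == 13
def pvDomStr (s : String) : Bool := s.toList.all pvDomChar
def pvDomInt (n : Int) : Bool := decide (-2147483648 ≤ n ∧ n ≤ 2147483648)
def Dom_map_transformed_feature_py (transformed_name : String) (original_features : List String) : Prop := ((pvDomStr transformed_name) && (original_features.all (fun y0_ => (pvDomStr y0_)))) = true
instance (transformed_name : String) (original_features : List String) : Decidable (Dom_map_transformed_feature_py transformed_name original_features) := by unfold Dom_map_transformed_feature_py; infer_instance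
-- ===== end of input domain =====

-- B replaces A's sort-by-length-descending-then-first-match by one unsorted pass keeping the
-- longest match (strict-greater update); the `__` stripping is unchanged.

-- ===== PORT A =====
-- the '__' stripping shared by both Pythons: raw_name = raw.split("__", 1)[1] when "__" in raw
-- (the [1] index always exists there, so the .getD defaults are unreachable)
def pvStrip (transformed_name : String) : String :=
  if PySem.Str.isIn "__" transformed_name then
    ((PySem.Str.splitMax? transformed_name "__" 1).getD []).getD 1 transformed_name
  else transformed_name

-- the 'for original in …: if …: return original' loop; falls through to raw_name
def pvFindA (raw_name : String) : List String → String
  | [] => raw_name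
  | original :: rest =>
      if raw_name == original || PySem.Str.startswith raw_name (original ++ "_") then original
      else pvFindA raw_name rest

def map_transformed_feature_py (transformed_name : String) (original_features : List String) : String :=
  let raw_name := pvStrip transformed_name
  pvFindA raw_name (PySem.List.sorted original_features (fun s => PySem.Str.len s) true)

-- ===== PORT B =====
-- the body of B's 'for item in original_features' loop: conditionally replace the best match
def pvStep (raw_name : String) (best : Option String) (original : String) : Option String :=
  if raw_name == original || PySem.Str.startswith raw_name (original ++ "_") then
    match best with
    | none => some original
    | some b => if PySem.Str.len b < PySem.Str.len original then some original else some b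
  else best

def map_transformed_feature_py_alt (transformed_name : String) (original_features : List String) : String :=
  let raw_name := pvStrip transformed_name
  let best := original_features.foldl (pvStep raw_name) none
  match best with
  | none => raw_name
  | some b => b

-- ===== PRECONDITION & SPEC =====
def Spec_map_transformed_feature_py (transformed_name : String) (original_features : List String) (out : String) : Prop := out = map_transformed_feature_py_alt transformed_name original_features
instance (transformed_name : String) (original_features : List String) (out : String) : Decidable (Spec_map_transformed_feature_py transformed_name original_features out) := by unfold Spec_map_transformed_feature_py; infer_instance

-- ===== CLAIM (what is proved, stated in full; the proofs are below) =====
def Claim_equal_map_transformed_feature_py : Prop := ∀ (transformed_name : String) (original_features : List String), Dom_map_transformed_feature_py transformed_name original_features → Spec_map_transformed_feature_py transformed_name original_features (map_transformed_feature_py transformed_name original_features)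

-- ===== LEMMAS AND PROOFS =====

-- the match test, abbreviated for the proofs
def pvPred (raw o : String) : Bool :=
  raw == o || PySem.Str.startswith raw (o ++ "_")

-- every match is a prefix of raw
lemma pvPred_prefix {raw o : String} (h : pvPred raw o = true) : o.toList <+: raw.toList := by
  unfold pvPred at h
  rcases Bool.or_eq_true_iff.mp h with h | h
  · rw [beq_iff_eq] at h; subst h; exact List.prefix_rfl
  · rw [PySem.Str.startswith_eq] at h
    have := (PySem.Chars.startswith_iff _ _).mp h
    rw [String.toList_append] at this
    exact (List.prefix_append o.toList ("_".toList)).trans this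

-- two matches of equal length are the same string
lemma pvPred_eq_of_len {raw o₁ o₂ : String} (h₁ : pvPred raw o₁ = true) (h₂ : pvPred raw o₂ = true)
    (hl : PySem.Str.len o₁ = PySem.Str.len o₂) : o₁ = o₂ := by
  have p₁ := pvPred_prefix h₁
  have p₂ := pvPred_prefix h₂
  rw [PySem.Str.len_eq, PySem.Str.len_eq, Int.natCast_inj] at hl
  rw [← String.toList_inj]
  rcases List.prefix_or_prefix_of_prefix p₁ p₂ with h | h
  · exact List.IsPrefix.eq_of_length h hl
  · exact (List.IsPrefix.eq_of_length h hl.symm).symm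

-- pvStep, case by case
lemma pvStep_neg {raw o : String} (h : pvPred raw o = false) (b : Option String) :
    pvStep raw b o = b := by
  have hcond : (raw == o || PySem.Str.startswith raw (o ++ "_")) = false := h
  unfold pvStep; rw [hcond]; rfl

lemma pvStep_pos_none {raw o : String} (h : pvPred raw o = true) :
    pvStep raw none o = some o := by
  have hcond : (raw == o || PySem.Str.startswith raw (o ++ "_")) = true := h
  unfold pvStep; rw [hcond]; rfl

lemma pvStep_pos_lt {raw o b' : String} (h : pvPred raw o = true)
    (hlt : PySem.Str.len b' < PySem.Str.len o) : pvStep raw (some b') o = some o := by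
  have hcond : (raw == o || PySem.Str.startswith raw (o ++ "_")) = true := h
  unfold pvStep; rw [hcond]
  show (if PySem.Str.len b' < PySem.Str.len o then some o else some b') = some o
  rw [if_pos hlt]

lemma pvStep_pos_ge {raw o b' : String} (h : pvPred raw o = true)
    (hge : ¬ PySem.Str.len b' < PySem.Str.len o) : pvStep raw (some b') o = some b' := by
  have hcond : (raw == o || PySem.Str.startswith raw (o ++ "_")) = true := h
  unfold pvStep; rw [hcond]
  show (if PySem.Str.len b' < PySem.Str.len o then some o else some b') = some b'
  rw [if_neg hge]

-- A's loop on a length-descending list returns raw on no match, else a longest match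
lemma pvFindA_spec (raw : String) (l : List String)
    (hp : l.Pairwise (fun a b => PySem.Str.len b ≤ PySem.Str.len a)) :
    (pvFindA raw l = raw ∧ ∀ o ∈ l, pvPred raw o = false) ∨
    (∃ x, pvFindA raw l = x ∧ x ∈ l ∧ pvPred raw x = true ∧
      ∀ o ∈ l, pvPred raw o = true → PySem.Str.len o ≤ PySem.Str.len x) := by
  induction l with
  | nil => exact Or.inl ⟨rfl, by simp⟩
  | cons o rest ih =>
    rcases List.pairwise_cons.mp hp with ⟨hhead, htail⟩
    by_cases h : pvPred raw o = true
    · have hcond : (raw == o || PySem.Str.startswith raw (o ++ "_")) = true := h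
      have hstep : pvFindA raw (o :: rest) = o := by
        show (if raw == o || PySem.Str.startswith raw (o ++ "_") then o else pvFindA raw rest) = o
        rw [hcond]; rfl
      refine Or.inr ⟨o, hstep, List.mem_cons_self, h, ?_⟩
      intro o' ho' _
      rcases List.mem_cons.mp ho' with rfl | ho'
      · exact le_refl _
      · exact hhead o' ho'
    · have hcond : (raw == o || PySem.Str.startswith raw (o ++ "_")) = false :=
        Bool.eq_false_iff.mpr h
      have hstep : pvFindA raw (o :: rest) = pvFindA raw rest := by
        show (if raw == o || PySem.Str.startswith raw (o ++ "_") then o else pvFindA raw rest) = _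
        rw [hcond]; rfl
      rcases ih htail with ⟨heq, hall⟩ | ⟨x, heq, hmem, hx, hmax⟩
      · refine Or.inl ⟨hstep.trans heq, ?_⟩
        intro o' ho'
        rcases List.mem_cons.mp ho' with rfl | ho'
        · exact Bool.eq_false_iff.mpr h
        · exact hall o' ho'
      · refine Or.inr ⟨x, hstep.trans heq, List.mem_cons_of_mem _ hmem, hx, ?_⟩
        intro o' ho' hpo'
        rcases List.mem_cons.mp ho' with rfl | ho'
        · exact absurd hpo' h
        · exact hmax o' ho' hpo'

-- B's fold keeps a longest match; the accumulator, when present, is a match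
lemma pvFoldB_spec (raw : String) (l : List String) (b : Option String)
    (hb : ∀ y, b = some y → pvPred raw y = true) :
    (l.foldl (pvStep raw) b = b ∧ ∀ o ∈ l, pvPred raw o = false) ∨
    (∃ x, l.foldl (pvStep raw) b = some x ∧ pvPred raw x = true ∧ (x ∈ l ∨ b = some x) ∧
      (∀ o ∈ l, pvPred raw o = true → PySem.Str.len o ≤ PySem.Str.len x) ∧
      (∀ y, b = some y → PySem.Str.len y ≤ PySem.Str.len x)) := by
  induction l generalizing b with
  | nil => exact Or.inl ⟨rfl, by simp⟩
  | cons o rest ih =>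
    rw [List.foldl_cons]
    by_cases h : pvPred raw o = true
    · -- the new accumulator after the head step
      have hmatch : ∃ z, pvStep raw b o = some z ∧ pvPred raw z = true ∧ (z = o ∨ b = some z) ∧
          PySem.Str.len o ≤ PySem.Str.len z ∧ (∀ y, b = some y → PySem.Str.len y ≤ PySem.Str.len z) := by
        cases b with
        | none => exact ⟨o, pvStep_pos_none h, h, Or.inl rfl, le_refl _, by intro y hy; cases hy⟩
        | some b' =>
          by_cases hlt : PySem.Str.len b' < PySem.Str.len o
          · exact ⟨o, pvStep_pos_lt h hlt, h, Or.inl rfl, le_refl _,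
              by intro y hy; cases hy; exact le_of_lt hlt⟩
          · exact ⟨b', pvStep_pos_ge h hlt, hb b' rfl, Or.inr rfl, le_of_not_gt hlt,
              by intro y hy; cases hy; exact le_refl _⟩
      rcases hmatch with ⟨z, hz, hpz, hzsrc, hoz, hbz⟩
      rw [hz]
      rcases ih (some z) (by intro y hy; cases hy; exact hpz) with ⟨heq, hall⟩ | ⟨x, heq, hx, hsrc, hmax, hacc⟩
      · refine Or.inr ⟨z, heq, hpz, ?_, ?_, hbz⟩
        · rcases hzsrc with rfl | hbz' <;> [exact Or.inl List.mem_cons_self; exact Or.inr hbz']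
        · intro o' ho' hpo'
          rcases List.mem_cons.mp ho' with rfl | ho'
          · exact hoz
          · rw [hall o' ho'] at hpo'; cases hpo'
      · refine Or.inr ⟨x, heq, hx, ?_, ?_, ?_⟩
        · rcases hsrc with hxl | hxz
          · exact Or.inl (List.mem_cons_of_mem _ hxl)
          · cases hxz
            rcases hzsrc with rfl | hbz' <;> [exact Or.inl List.mem_cons_self; exact Or.inr hbz']
        · intro o' ho' hpo'
          rcases List.mem_cons.mp ho' with rfl | ho'
          · exact le_trans hoz (hacc z rfl)
          · exact hmax o' ho' hpo'
        · intro y hy; exact le_trans (hbz y hy) (hacc z rfl)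
    · rw [pvStep_neg (Bool.eq_false_iff.mpr h) b]
      rcases ih b hb with ⟨heq, hall⟩ | ⟨x, heq, hx, hsrc, hmax, hacc⟩
      · refine Or.inl ⟨heq, ?_⟩
        intro o' ho'
        rcases List.mem_cons.mp ho' with rfl | ho'
        · exact Bool.eq_false_iff.mpr h
        · exact hall o' ho'
      · refine Or.inr ⟨x, heq, hx, ?_, ?_, hacc⟩
        · rcases hsrc with hxl | hxb
          · exact Or.inl (List.mem_cons_of_mem _ hxl)
          · exact Or.inr hxb
        · intro o' ho' hpo'
          rcases List.mem_cons.mp ho' with rfl | ho'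
          · exact absurd hpo' h
          · exact hmax o' ho' hpo'

-- the two loops agree for any raw_name
lemma pvMain (raw : String) (fs : List String) :
    pvFindA raw (PySem.List.sorted fs (fun s => PySem.Str.len s) true) =
    (match fs.foldl (pvStep raw) none with
      | none => raw
      | some b => b) := by
  have hA := pvFindA_spec raw (PySem.List.sorted fs (fun s => PySem.Str.len s) true)
    (PySem.List.sorted_pairwise_rev fs _)
  have hB := pvFoldB_spec raw fs none (by intro y hy; cases hy)
  simp only [PySem.List.mem_sorted] at hA
  rcases hA with ⟨hAeq, hAall⟩ | ⟨x, hAeq, hAmem, hAx, hAmax⟩ <;>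
    rcases hB with ⟨hBeq, hBall⟩ | ⟨y, hBeq, hBy, hBsrc, hBmax, _⟩
  · rw [hBeq, hAeq]
  · have hyl : y ∈ fs := by
      rcases hBsrc with hyl | hyb
      · exact hyl
      · cases hyb
    rw [hAall y hyl] at hBy; cases hBy
  · rw [hBall x hAmem] at hAx; cases hAx
  · have hyl : y ∈ fs := by
      rcases hBsrc with hyl | hyb
      · exact hyl
      · cases hyb
    have hxy : x = y := pvPred_eq_of_len hAx hBy
      (le_antisymm (hBmax x hAmem hAx) (hAmax y hyl hBy))
    rw [hBeq, hAeq, hxy]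

-- ===== VERDICT (by name: the statement is the Claim_ definition above) =====
theorem map_transformed_feature_py_spec : Claim_equal_map_transformed_feature_py := by
  intro transformed_name original_features _
  unfold Spec_map_transformed_feature_py map_transformed_feature_py map_transformed_feature_py_alt
  exact pvMain (pvStrip transformed_name) original_features
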